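-- pv_equiv track=rewrite | github.com/miliar/Code_Jam_Webscraper | Solutions_python/Problem_177/2396.py | check
-- ===== SOURCE A (Python) =====
-- def check(l):
--
-- 	count = 0
-- 	num = [1, 2, 3, 4, 5, 6, 7, 8, 9, 0]
-- 	for d in l:
-- 		if(d in num):
-- 			num.remove(d)
--
-- 	if (len(num) == 0):
-- 		return True
--
-- 	return False
-- ===== SOURCE B (Python) =====
-- def check(l):
--     return all(d in l for d in range(10))
-- ===== Notes on version B (the rewrite author's own statement) =====
-- stated objective: idiomatic
-- what changed: Instead of walking l and removing found digits from a shrinking todo-list, B iterates the ten required digits and checks membership in l with all(), short-circuiting on the first missing digit.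
import Mathlib
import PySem

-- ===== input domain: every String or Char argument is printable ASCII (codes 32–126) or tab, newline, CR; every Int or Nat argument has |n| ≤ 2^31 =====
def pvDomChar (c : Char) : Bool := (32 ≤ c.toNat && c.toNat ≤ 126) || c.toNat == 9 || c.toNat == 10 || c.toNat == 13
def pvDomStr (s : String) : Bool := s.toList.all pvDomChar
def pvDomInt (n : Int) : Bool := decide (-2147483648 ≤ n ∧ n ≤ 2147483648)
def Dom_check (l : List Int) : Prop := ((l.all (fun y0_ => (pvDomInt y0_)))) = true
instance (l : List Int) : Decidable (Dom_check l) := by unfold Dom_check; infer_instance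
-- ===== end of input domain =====

-- B iterates the ten required digits checking membership in l instead of A's shrinking todo-list; idiomatic, same cost.

-- ===== PORT A =====
-- for d in l: if d in num: num.remove(d)  — List.erase removes the first occurrence, exactly list.remove
def check (l : List Int) : Bool :=
  let num : List Int := [1, 2, 3, 4, 5, 6, 7, 8, 9, 0]
  let num := l.foldl (fun num d => if num.contains d then num.erase d else num) num
  if num.length = 0 then true else false

-- ===== PORT B =====
-- all(d in l for d in range(10))
def check_alt (l : List Int) : Bool :=
  (PySem.List.pyRange 0 10 1).all (fun d => l.contains d)

-- ===== PRECONDITION & SPEC =====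
def Spec_check (l : List Int) (out : Bool) : Prop := out = check_alt l
instance (l : List Int) (out : Bool) : Decidable (Spec_check l out) := by unfold Spec_check; infer_instance

-- ===== CLAIM (what is proved, stated in full; the proofs are below) =====
def Claim_equal_check : Prop := ∀ (l : List Int), Dom_check l → Spec_check l (check l)

-- ===== LEMMAS AND PROOFS =====

-- the loop of A leaves exactly the todo digits not occurring in l
lemma foldl_erase_eq_filter (l num : List Int) (hnd : num.Nodup) :
    l.foldl (fun num d => if num.contains d then num.erase d else num) num
      = num.filter (fun x => !l.contains x) := by
  induction l generalizing num with
  | nil => simp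
  | cons d ds ih =>
    have hstep : (if num.contains d then num.erase d else num)
        = num.filter (fun x => !(x == d)) := by
      by_cases h : d ∈ num
      · simp only [List.contains_eq_mem, h, decide_true, if_true,
          List.Nodup.erase_eq_filter hnd]
        apply List.filter_congr; intro x _; simp [bne]
      · simp only [List.contains_eq_mem, h, decide_false]
        symm
        apply List.filter_eq_self.mpr
        intro x hx
        simp; rintro rfl; exact h hx
    rw [List.foldl_cons, hstep, ih _ (hnd.filter _), List.filter_filter]
    apply List.filter_congr; intro x _
    simp only [List.contains_cons, Bool.not_or, Bool.and_comm]

-- ===== VERDICT (by name: the statement is the Claim_ definition above) =====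
theorem check_spec : Claim_equal_check := by
  intro l _
  unfold Spec_check check check_alt
  simp only []
  rw [foldl_erase_eq_filter l _ (by decide),
    show PySem.List.pyRange 0 10 1 = [0,1,2,3,4,5,6,7,8,9] from by decide]
  have key : (([1,2,3,4,5,6,7,8,9,0] : List Int).filter
        (fun x => !l.contains x)).length = 0
      ↔ (∀ x ∈ ([1,2,3,4,5,6,7,8,9,0] : List Int), l.contains x = true) := by
    rw [List.length_eq_zero_iff, List.filter_eq_nil_iff]
    simp
  by_cases h : ∀ x ∈ ([1,2,3,4,5,6,7,8,9,0] : List Int), l.contains x = true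
  · rw [if_pos (key.mpr h)]
    symm
    rw [List.all_eq_true]
    intro x hx
    apply h
    simp only [List.mem_cons, List.not_mem_nil, or_false] at hx ⊢
    tauto
  · rw [if_neg (fun hh => h (key.mp hh))]
    symm
    rw [Bool.eq_false_iff]
    intro hall
    apply h
    intro x hx
    apply List.all_eq_true.mp hall
    simp only [List.mem_cons, List.not_mem_nil, or_false] at hx ⊢
    tauto
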